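-- pv_equiv track=rewrite | github.com/thisElazar/ledarcade | visuals/latindna.py | _beat_labels
-- ===== SOURCE A (Python) =====
-- def _beat_labels(n):
--     """Return label string for each step position."""
--     if n == 8:
--         # 1 bar of 4/4, 8th notes: 1 + 2 + 3 + 4 +
--         return ['1', '+', '2', '+', '3', '+', '4', '+']
--     elif n == 16:
--         # 2 bars of 4/4, 8th notes: each bar gets 1 + 2 + 3 + 4 +
--         bar = ['1', '+', '2', '+', '3', '+', '4', '+']
--         return bar + bar
--     elif n == 12:
--         # 12/8: 4 dotted-quarter pulses, mark only the main beats
--         return ['1', '', '', '2', '', '', '3', '', '', '4', '', '']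
--     else:
--         return ['' for _ in range(n)]
-- ===== SOURCE B (Python) =====
-- def _beat_labels(n):
--     """Return label string for each step position."""
--     # subdivisions per beat for the known grid sizes
--     sub = {8: 2, 16: 2, 12: 3}.get(n)
--     if sub is None:
--         return [''] * n
--     filler = '+' if sub == 2 else ''
--     out = []
--     beat = 0
--     while len(out) < n:
--         beat = beat % 4 + 1          # wrap after beat 4
--         out.append(str(beat))
--         out.extend([filler] * (sub - 1))
--     return out
-- ===== Notes on version B (the rewrite author's own statement) =====
-- stated objective: alternative
-- what changed: Replaces the hardcoded per-branch label tables with a beat-tiling accumulator loop: a dict maps grid size to subdivisions per beat, then a while-loop emits str(beat) (beat wrapping 1..4) followed by filler padding until n labels exist.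
import Mathlib
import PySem

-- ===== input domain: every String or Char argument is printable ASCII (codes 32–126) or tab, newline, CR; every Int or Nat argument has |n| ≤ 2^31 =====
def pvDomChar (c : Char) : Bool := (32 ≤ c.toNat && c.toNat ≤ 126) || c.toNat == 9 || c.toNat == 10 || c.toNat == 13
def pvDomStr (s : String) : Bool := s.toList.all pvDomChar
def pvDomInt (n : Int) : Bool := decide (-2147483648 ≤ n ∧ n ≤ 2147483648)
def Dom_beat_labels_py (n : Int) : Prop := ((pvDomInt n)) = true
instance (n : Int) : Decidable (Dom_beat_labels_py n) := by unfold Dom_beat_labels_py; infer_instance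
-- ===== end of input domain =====

-- B replaces A's hardcoded label tables by a beat-tiling accumulator loop (alternative decomposition, same cost).


-- ===== PORT A =====
-- Literal transliteration of A: hardcoded label tables per n.
def beat_labels_py (n : Int) : List String :=
  if n == 8 then ["1", "+", "2", "+", "3", "+", "4", "+"]
  else if n == 16 then
    let bar := ["1", "+", "2", "+", "3", "+", "4", "+"]
    bar ++ bar
  else if n == 12 then ["1", "", "", "2", "", "", "3", "", "", "4", "", ""]
  else (PySem.List.pyRange 0 n 1).map (fun _ => "")

-- ===== PORT B =====
-- B's while-loop: emit str(beat) then filler padding until n labels; fuel = n.toNat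
-- bounds the iterations (each appends at least one element), only to make it total.
def blLoop : Nat → Int → Int → String → Int → List String → List String
  | 0, _, _, _, _, out => out
  | fuel+1, n, sub, filler, beat, out =>
    if (out.length : Int) < n then
      let beat' := PySem.Int.mod beat 4 + 1
      blLoop fuel n sub filler beat'
        ((out ++ [PySem.Int.toStr beat']) ++ PySem.List.pyRepeat [filler] (sub - 1))
    else out

def beat_labels_py_alt (n : Int) : List String :=
  match (PySem.Dict.ofList [((8:Int),(2:Int)),(16,2),(12,3)]).get? n with
  | none => PySem.List.pyRepeat [""] n
  | some sub => blLoop n.toNat n sub (if sub == 2 then "+" else "") 0 []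

-- ===== PRECONDITION & SPEC =====
def Spec_beat_labels_py (n : Int) (out : List String) : Prop := out = beat_labels_py_alt n
instance (n : Int) (out : List String) : Decidable (Spec_beat_labels_py n out) := by unfold Spec_beat_labels_py; infer_instance

-- ===== CLAIM (what is proved, stated in full; the proofs are below) =====
def Claim_equal_beat_labels_py : Prop := ∀ (n : Int), Dom_beat_labels_py n → Spec_beat_labels_py n (beat_labels_py n)

-- ===== LEMMAS AND PROOFS =====

-- ===== VERDICT (by name: the statement is the Claim_ definition above) =====
theorem beat_labels_py_spec : Claim_equal_beat_labels_py := by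
  intro n _
  unfold Spec_beat_labels_py
  by_cases h8 : n = 8
  · subst h8; decide
  by_cases h16 : n = 16
  · subst h16; decide
  by_cases h12 : n = 12
  · subst h12; decide
  unfold beat_labels_py beat_labels_py_alt
  have hd : PySem.Dict.ofList [((8:Int),(2:Int)),(16,2),(12,3)]
      = PySem.Dict.mk [(8,2),(16,2),(12,3)] := by decide
  rw [hd]
  simp [PySem.Dict.get?, h8, h16, h12,
    Ne.symm h8, Ne.symm h16, Ne.symm h12, PySem.List.pyRange_one,
    PySem.List.pyRepeat_singleton]
  simp only [Function.comp_def, List.map_const', List.length_range]
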